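-- pv_equiv track=rewrite | github.com/danieldemercado/GeigerBIP39Generator | GeigerBIP39Generator.py | get_random_bits
-- ===== SOURCE A (Python) =====
-- def get_random_bits(ticks):     # Extracts the random bits from the processed data
--
--     random_bits = ""
--
--     for n in range(2,len(ticks),2):
--
--         t1 = ticks[n-1] - ticks[n-2]
--         t2 = ticks[n] - ticks[n-1]
--
--         if t1 > t2:         # If the time betwen the first and second ticks is greater than the time betwen the second and the third:
--
--             random_bits = random_bits + str(0)      # Add a 0 to the random generated bits
--
--         elif t1 < t2:
--
--             random_bits = random_bits + str(1)      # Else add a 1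
--
--     return str(random_bits)
-- ===== SOURCE B (Python) =====
-- def get_random_bits(ticks):     # Extracts the random bits from the processed data
--     # Each bit looks at a triple (a, b, c) = ticks[2k], ticks[2k+1], ticks[2k+2]:
--     # the first interval exceeds the second iff the middle tick lies above the
--     # average of its neighbours, i.e. iff a + c < 2*b.  So take the three
--     # stride-2 slices, zip them into triples, and map the sign of a + c - 2*b
--     # through a sign->bit table (a tie maps to the empty string).
--     sign_bit = {1: '1', -1: '0'}
--     triples = zip(ticks[0::2], ticks[1::2], ticks[2::2])
--     return ''.join(sign_bit.get((a + c > 2 * b) - (a + c < 2 * b), '')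
--                    for a, b, c in triples)
-- ===== Notes on version B (the rewrite author's own statement) =====
-- stated objective: alternative
-- what changed: A loops over step-2 indices and compares the two adjacent inter-tick intervals with an if/elif chain that concatenates onto a string; B never forms intervals: it zips the three stride-2 slices of the tick list into triples (a,b,c), computes the sign of a+c-2*b (whether the middle tick is below/above the average of its neighbours, which is equivalent), and maps that sign through a sign->bit dictionary into a join.
import Mathlib
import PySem

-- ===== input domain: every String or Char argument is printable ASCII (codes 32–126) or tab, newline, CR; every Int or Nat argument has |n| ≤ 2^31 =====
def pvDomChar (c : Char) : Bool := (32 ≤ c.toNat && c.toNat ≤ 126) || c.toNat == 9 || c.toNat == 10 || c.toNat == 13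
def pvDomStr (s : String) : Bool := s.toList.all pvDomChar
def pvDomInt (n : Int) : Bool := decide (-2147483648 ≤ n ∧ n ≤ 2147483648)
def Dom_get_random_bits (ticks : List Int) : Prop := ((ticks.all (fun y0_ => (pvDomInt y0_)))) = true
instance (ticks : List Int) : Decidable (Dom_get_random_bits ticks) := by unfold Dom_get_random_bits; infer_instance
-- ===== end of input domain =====

-- B replaces A's step-2 index loop over interval differences by zipping the three stride-2
-- slices into triples and mapping the sign of a+c-2b through a sign->bit table
-- (objective: alternative formulation; same O(n) cost).

-- ===== PORT A =====
-- Python strings are modeled as List Char built up by the loop, packed with String.mk at the end.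
def get_random_bits (ticks : List Int) : String :=
  String.mk ((PySem.List.pyRange 2 (PySem.List.len ticks) 2).foldl
    (fun random_bits n =>
      let t1 := PySem.List.pyGetD ticks (n - 1) 0 - PySem.List.pyGetD ticks (n - 2) 0
      let t2 := PySem.List.pyGetD ticks n 0 - PySem.List.pyGetD ticks (n - 1) 0
      if t1 > t2 then random_bits ++ PySem.Int.toChars 0
      else if t1 < t2 then random_bits ++ PySem.Int.toChars 1
      else random_bits) [])

-- ===== PORT B =====
-- PySem has no stepped slice, so xs[::2] is ported by hand (exact: every second
-- element starting at index 0); xs[k::2] = pvStride2 (xs.drop k).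
def pvStride2 : List Int → List Int
  | [] => []
  | [x] => [x]
  | x :: _ :: rest => x :: pvStride2 rest

-- zip(s0, s1, s2) is modeled as List.zip s0 (List.zip s1 s2): same length (the minimum),
-- triple (a, b, c) becomes (a, (b, c)).
def get_random_bits_alt (ticks : List Int) : String :=
  let sign_bit : PySem.Dict Int (List Char) := PySem.Dict.ofList [((1 : Int), ['1']), ((-1 : Int), ['0'])]
  let triples := List.zip (pvStride2 ticks) (List.zip (pvStride2 ticks.tail) (pvStride2 (ticks.drop 2)))
  String.mk (triples.map (fun t =>
    PySem.Dict.getD sign_bit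
      ((if t.1 + t.2.2 > 2 * t.2.1 then 1 else 0) - (if t.1 + t.2.2 < 2 * t.2.1 then 1 else 0))
      [])).flatten

-- ===== PRECONDITION & SPEC =====
def Spec_get_random_bits (ticks : List Int) (out : String) : Prop := out = get_random_bits_alt ticks
instance (ticks : List Int) (out : String) : Decidable (Spec_get_random_bits ticks out) := by unfold Spec_get_random_bits; infer_instance

-- ===== CLAIM (what is proved, stated in full; the proofs are below) =====
def Claim_equal_get_random_bits : Prop := ∀ (ticks : List Int), Dom_get_random_bits ticks → Spec_get_random_bits ticks (get_random_bits ticks)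

-- ===== LEMMAS AND PROOFS =====

-- the bit emitted for a pair of intervals
def pvBit (t1 t2 : Int) : List Char :=
  if t1 > t2 then ['0'] else if t1 < t2 then ['1'] else []

-- A's loop body at index n, as a pure function of n
def pvG (ticks : List Int) (n : Int) : List Char :=
  pvBit (PySem.List.pyGetD ticks (n - 1) 0 - PySem.List.pyGetD ticks (n - 2) 0)
        (PySem.List.pyGetD ticks n 0 - PySem.List.pyGetD ticks (n - 1) 0)

-- B's triple list, named for the induction
def pvTriples (ticks : List Int) : List (Int × Int × Int) :=
  List.zip (pvStride2 ticks) (List.zip (pvStride2 ticks.tail) (pvStride2 (ticks.drop 2)))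

lemma pv_triples_cons (a b c : Int) (rest : List Int) :
    pvTriples (a :: b :: c :: rest) = (a, (b, c)) :: pvTriples (c :: rest) := by
  cases rest with
  | nil => rfl
  | cons r rest' => cases rest' <;> simp [pvTriples, pvStride2]

lemma pv_dict_bit (a b c : Int) :
    PySem.Dict.getD (PySem.Dict.ofList [((1 : Int), ['1']), ((-1 : Int), ['0'])])
      ((if a + c > 2 * b then 1 else 0) - (if a + c < 2 * b then (1 : Int) else 0)) [] =
    pvBit (b - a) (c - b) := by
  unfold pvBit
  rcases lt_trichotomy (a + c) (2 * b) with h | h | h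
  · rw [if_neg (by omega), if_pos h, if_pos (by omega)]; rfl
  · rw [if_neg (by omega), if_neg (by omega), if_neg (by omega), if_neg (by omega)]; rfl
  · rw [if_pos h, if_neg (by omega), if_neg (by omega), if_pos (by omega)]; rfl

lemma pv_shift (a b : Int) (t : List Int) (k : Nat) :
    pvG (a :: b :: t) (2 + 2 * ((k : Int) + 1)) = pvG t (2 + 2 * (k : Int)) := by
  have h1 : (2 + 2 * ((k : Int) + 1) - 1) = ((2 * k + 3 : Nat) : Int) := by push_cast; ring
  have h2 : (2 + 2 * ((k : Int) + 1) - 2) = ((2 * k + 2 : Nat) : Int) := by push_cast; ring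
  have h3 : (2 + 2 * ((k : Int) + 1)) = ((2 * k + 4 : Nat) : Int) := by push_cast; ring
  have h4 : (2 + 2 * (k : Int) - 1) = ((2 * k + 1 : Nat) : Int) := by push_cast; ring
  have h5 : (2 + 2 * (k : Int) - 2) = ((2 * k : Nat) : Int) := by push_cast; ring
  have h6 : (2 + 2 * (k : Int)) = ((2 * k + 2 : Nat) : Int) := by push_cast; ring
  unfold pvG
  rw [h1, h2, h3, h4, h5, h6]
  simp only [PySem.List.pyGetD_natCast]
  simp only [show 2 * k + 3 = (2 * k + 1) + 1 + 1 from by ring,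
             show 2 * k + 2 = 2 * k + 1 + 1 from by ring,
             show 2 * k + 4 = (2 * k + 2) + 1 + 1 from by ring,
             List.getD_cons_succ]

lemma pv_main : ∀ (ticks : List Int),
    List.flatMap (pvG ticks) (PySem.List.pyRange 2 (PySem.List.len ticks) 2) =
      List.flatMap (fun t : Int × Int × Int => pvBit (t.2.1 - t.1) (t.2.2 - t.2.1)) (pvTriples ticks)
  | [] => by rfl
  | [a] => by rfl
  | [a, b] => by rfl
  | a :: b :: c :: rest => by
    have ih := pv_main (c :: rest)
    have hlen : PySem.List.len (a :: b :: c :: rest) = ((rest.length + 3 : Nat) : Int) := by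
      simp [PySem.List.len_eq]; omega
    have hlen' : PySem.List.len (c :: rest) = ((rest.length + 1 : Nat) : Int) := by
      simp [PySem.List.len_eq]
    rw [hlen, PySem.List.pyRange_of_pos 2 _ (by norm_num)] at *
    have hc1 : (if (2 : Int) < ((rest.length + 3 : Nat) : Int)
        then ((((rest.length + 3 : Nat) : Int) - 2 + 2 - 1) / 2).toNat else 0) = rest.length / 2 + 1 := by
      split <;> omega
    have hc2 : (if (2 : Int) < ((rest.length + 1 : Nat) : Int)
        then ((((rest.length + 1 : Nat) : Int) - 2 + 2 - 1) / 2).toNat else 0) = rest.length / 2 := by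
      split <;> omega
    rw [hc1]
    rw [hlen'] at ih
    rw [hc2] at ih
    rw [List.range_succ_eq_map, List.map_cons, List.flatMap_cons, List.flatMap_map] at *
    have hshift : (fun k : Nat => pvG (a :: b :: c :: rest) (2 + 2 * ((Nat.succ k : Nat) : Int)))
        = fun k : Nat => pvG (c :: rest) (2 + 2 * (k : Int)) := by
      funext k
      have hs : ((Nat.succ k : Nat) : Int) = (k : Int) + 1 := by push_cast; ring
      rw [hs]
      exact pv_shift a b (c :: rest) k
    rw [List.flatMap_map, hshift, ih]
    have hhead : pvG (a :: b :: c :: rest) (2 + 2 * ((0 : Nat) : Int)) = pvBit (b - a) (c - b) := by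
      unfold pvG
      norm_num
      simp [PySem.List.pyGetD_ofNat']
    rw [hhead, pv_triples_cons, List.flatMap_cons]

lemma pv_foldl_A (ticks : List Int) :
    (PySem.List.pyRange 2 (PySem.List.len ticks) 2).foldl
      (fun random_bits n =>
        let t1 := PySem.List.pyGetD ticks (n - 1) 0 - PySem.List.pyGetD ticks (n - 2) 0
        let t2 := PySem.List.pyGetD ticks n 0 - PySem.List.pyGetD ticks (n - 1) 0
        if t1 > t2 then random_bits ++ PySem.Int.toChars 0
        else if t1 < t2 then random_bits ++ PySem.Int.toChars 1
        else random_bits) [] =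
      List.flatMap (pvG ticks) (PySem.List.pyRange 2 (PySem.List.len ticks) 2) := by
  have hb : (fun (random_bits : List Char) (n : Int) =>
      let t1 := PySem.List.pyGetD ticks (n - 1) 0 - PySem.List.pyGetD ticks (n - 2) 0
      let t2 := PySem.List.pyGetD ticks n 0 - PySem.List.pyGetD ticks (n - 1) 0
      if t1 > t2 then random_bits ++ PySem.Int.toChars 0
      else if t1 < t2 then random_bits ++ PySem.Int.toChars 1
      else random_bits) = fun acc n => acc ++ pvG ticks n := by
    funext acc n
    simp only [pvG, pvBit]
    split_ifs <;> simp [show PySem.Int.toChars 0 = ['0'] from by decide,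
      show PySem.Int.toChars 1 = ['1'] from by decide]
  rw [hb, PySem.List.foldl_append_eq_flatMap]
  simp

-- ===== VERDICT (by name: the statement is the Claim_ definition above) =====
theorem get_random_bits_spec : Claim_equal_get_random_bits := by
  intro ticks _
  unfold Spec_get_random_bits get_random_bits get_random_bits_alt
  rw [pv_foldl_A, pv_main]
  congr 1
  rw [List.flatten_eq_flatMap, List.flatMap_map]
  unfold pvTriples
  exact List.flatMap_congr (fun t _ => (pv_dict_bit t.1 t.2.1 t.2.2).symm)
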